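-- pv_equiv track=rewrite | github.com/Isaacdl2/ClassProjects | Python/CSC_110/one_d_chess.py | whos_the_winner
-- ===== SOURCE A (Python) =====
-- def is_game_over(board):
--     '''
--     This function determines weather or not the game is over. The game is over one a king on either side is taken.
--     Args:
--         board: List represting chess board.
--     Returns: Boolean representing wheter the game is over or not. True = game over, False = game not over.
--     '''
--
--     count = 0
--
--     for item in board:
--         if item[1:] == "Ki":
--             count+=1
--     if count == 1:
--         return True
--     return False
--
-- def whos_the_winner(board):
--     '''
--     This function determines who is the winner of the game.
--     Args:
--         board: List represting chess board.
--     Returns: String represting the winner. "White" or "Black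
--     '''
--
--     if is_game_over(board):
--         for item in board:
--             if item == "BKi":
--                 return "Black"
--             if item == "WKi":
--                 return "White"
--     return None
-- ===== SOURCE B (Python) =====
-- def whos_the_winner(board):
--     black = white = kings = 0
--     for piece in board:
--         if piece[1:] == "Ki":
--             kings += 1
--             if piece == "BKi":
--                 black += 1
--             elif piece == "WKi":
--                 white += 1
--     if kings == 1:
--         if black == 1:
--             return "Black"
--         if white == 1:
--             return "White"
--     return None
-- ===== Notes on version B (the rewrite author's own statement) =====
-- stated objective: alternative
-- what changed: Replaces A's two staged passes (count kings, then re-scan the board for the first BKi/WKi with early returns) by one single pass accumulating three counters (kings, BKi, WKi), with the winner decided purely arithmetically from the counters afterwards - the board is never re-traversed.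
import Mathlib
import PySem

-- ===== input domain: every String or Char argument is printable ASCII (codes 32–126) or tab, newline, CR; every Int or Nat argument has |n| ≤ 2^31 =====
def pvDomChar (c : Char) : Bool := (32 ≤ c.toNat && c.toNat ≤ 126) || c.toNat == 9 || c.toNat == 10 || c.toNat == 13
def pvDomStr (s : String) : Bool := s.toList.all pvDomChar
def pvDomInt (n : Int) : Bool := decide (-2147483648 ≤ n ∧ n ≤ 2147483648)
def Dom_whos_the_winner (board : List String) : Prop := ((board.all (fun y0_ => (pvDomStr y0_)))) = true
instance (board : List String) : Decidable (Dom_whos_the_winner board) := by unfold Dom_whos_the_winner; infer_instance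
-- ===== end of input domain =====

-- B replaces A's two staged passes (count kings, then re-scan for the first BKi/WKi) by one
-- single pass over the board accumulating three counters, deciding the winner arithmetically.

-- ===== PORT A =====
-- count = 0; for item in board: if item[1:] == "Ki": count += 1; return count == 1
def is_game_over (board : List String) : Bool :=
  let count := board.foldl (fun count item =>
    if PySem.Str.slice item (some 1) none = "Ki" then count + 1 else count) (0 : Int)
  count == 1

-- the for-loop with early returns inside whos_the_winner
def aFindWinner : List String → Option String
  | [] => none
  | item :: rest =>
    if item = "BKi" then some "Black"
    else if item = "WKi" then some "White"
    else aFindWinner rest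

def whos_the_winner (board : List String) : Option String :=
  if is_game_over board then aFindWinner board else none

-- ===== PORT B =====
-- single pass: state (black, white, kings); then a purely arithmetic decision
def whos_the_winner_alt (board : List String) : Option String :=
  let s := board.foldl (fun (s : Int × Int × Int) piece =>
    if PySem.Str.slice piece (some 1) none = "Ki" then
      if piece = "BKi" then (s.1 + 1, s.2.1, s.2.2 + 1)
      else if piece = "WKi" then (s.1, s.2.1 + 1, s.2.2 + 1)
      else (s.1, s.2.1, s.2.2 + 1)
    else s) ((0 : Int), (0 : Int), (0 : Int))
  if s.2.2 = 1 then
    if s.1 = 1 then some "Black"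
    else if s.2.1 = 1 then some "White"
    else none
  else none

-- ===== PRECONDITION & SPEC =====
def Spec_whos_the_winner (board : List String) (out : Option String) : Prop := out = whos_the_winner_alt board
instance (board : List String) (out : Option String) : Decidable (Spec_whos_the_winner board out) := by unfold Spec_whos_the_winner; infer_instance

-- ===== CLAIM (what is proved, stated in full; the proofs are below) =====
def Claim_equal_whos_the_winner : Prop := ∀ (board : List String), Dom_whos_the_winner board → Spec_whos_the_winner board (whos_the_winner board)

-- ===== LEMMAS AND PROOFS =====

-- abbreviation used only by the proofs
def pvKing (item : String) : Bool := PySem.Str.slice item (some 1) none = "Ki"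

-- A's count: the fold starting at c equals c + number of king elements
theorem pv_count_eq (board : List String) (c : Int) :
    board.foldl (fun count item =>
      if PySem.Str.slice item (some 1) none = "Ki" then count + 1 else count) c
    = c + (board.filter pvKing).length := by
  induction board generalizing c with
  | nil => simp
  | cons x xs ih =>
    simp only [List.foldl_cons, List.filter_cons, pvKing]
    by_cases h : PySem.Str.slice x (some 1) none = "Ki" <;> simp [h, ih] <;> omega

-- B's fold computes the three counts
theorem pv_fold_eq (board : List String) (b w k : Int) :
    board.foldl (fun (s : Int × Int × Int) piece =>
      if PySem.Str.slice piece (some 1) none = "Ki" then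
        if piece = "BKi" then (s.1 + 1, s.2.1, s.2.2 + 1)
        else if piece = "WKi" then (s.1, s.2.1 + 1, s.2.2 + 1)
        else (s.1, s.2.1, s.2.2 + 1)
      else s) (b, w, k)
    = (b + board.count "BKi", w + board.count "WKi", k + (board.filter pvKing).length) := by
  induction board generalizing b w k with
  | nil => simp
  | cons x xs ih =>
    simp only [List.foldl_cons, List.count_cons, List.filter_cons]
    by_cases hx : PySem.Str.slice x (some 1) none = "Ki"
    · by_cases hb : x = "BKi"
      · subst hb
        simp only [if_pos hx, reduceIte, ih, pvKing, hx]
        refine Prod.ext ?_ (Prod.ext ?_ ?_) <;> simp <;> push_cast <;> ring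
      · by_cases hw : x = "WKi"
        · subst hw
          simp only [if_pos hx, if_neg hb, reduceIte, ih, pvKing, hx]
          refine Prod.ext ?_ (Prod.ext ?_ ?_) <;> simp <;> push_cast <;> ring
        · simp only [if_pos hx, if_neg hb, if_neg hw, ih, pvKing, hx]
          refine Prod.ext ?_ (Prod.ext ?_ ?_) <;> simp [hb, hw] <;> push_cast <;> ring
    · have hb : x ≠ "BKi" := by rintro rfl; exact hx (by decide)
      have hw : x ≠ "WKi" := by rintro rfl; exact hx (by decide)
      simp only [if_neg hx, ih, pvKing, hx]
      simp [hb, hw]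

-- if no element of xs is a king, A's search loop returns none
theorem pv_find_none (xs : List String)
    (h : ∀ y ∈ xs, pvKing y = false) : aFindWinner xs = none := by
  induction xs with
  | nil => rfl
  | cons x xs ih =>
    have hx := h x (by simp)
    have hB : x ≠ "BKi" := by rintro rfl; exact absurd hx (by decide)
    have hW : x ≠ "WKi" := by rintro rfl; exact absurd hx (by decide)
    simp only [aFindWinner, if_neg hB, if_neg hW]
    exact ih (fun y hy => h y (by simp [hy]))

-- when exactly one king remains, A's search equals B's arithmetic decision
theorem pv_find_eq (board : List String)
    (h : (board.filter pvKing).length = 1) :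
    aFindWinner board =
      (if (board.count "BKi" : Int) = 1 then some "Black"
       else if (board.count "WKi" : Int) = 1 then some "White"
       else none) := by
  induction board with
  | nil => simp at h
  | cons x xs ih =>
    by_cases hx : pvKing x
    · simp only [List.filter_cons, hx, if_true, List.length_cons] at h
      have hrest : xs.filter pvKing = [] := List.eq_nil_of_length_eq_zero (by omega)
      have hnok : ∀ y ∈ xs, pvKing y = false := by
        intro y hy
        by_contra hk
        have : y ∈ xs.filter pvKing := List.mem_filter.mpr ⟨hy, by simpa using hk⟩
        simp [hrest] at this
      have hnone : aFindWinner xs = none := pv_find_none xs hnok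
      have hncB : xs.count "BKi" = 0 := by
        rw [List.count_eq_zero]
        intro hmem
        exact absurd (hnok _ hmem) (by decide)
      have hncW : xs.count "WKi" = 0 := by
        rw [List.count_eq_zero]
        intro hmem
        exact absurd (hnok _ hmem) (by decide)
      by_cases hB : x = "BKi"
      · subst hB
        simp [aFindWinner, List.count_cons, hncB]
      · by_cases hW : x = "WKi"
        · subst hW
          simp [aFindWinner, List.count_cons, hncB, hncW, hB]
        · simp [aFindWinner, hB, hW, hnone, List.count_cons, hncB, hncW]
    · have hB : x ≠ "BKi" := by rintro rfl; exact absurd hx (by decide)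
      have hW : x ≠ "WKi" := by rintro rfl; exact absurd hx (by decide)
      simp only [List.filter_cons, hx] at h
      simp only [aFindWinner, if_neg hB, if_neg hW, List.count_cons, hB, hW]
      simpa [hB, hW] using ih (by simpa using h)

-- ===== VERDICT (by name: the statement is the Claim_ definition above) =====
theorem whos_the_winner_spec : Claim_equal_whos_the_winner := by
  intro board _
  unfold Spec_whos_the_winner whos_the_winner whos_the_winner_alt is_game_over
  simp only [pv_count_eq, pv_fold_eq, zero_add]
  by_cases h : ((board.filter pvKing).length : Int) = 1
  · have h' : (board.filter pvKing).length = 1 := by exact_mod_cast h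
    have hbeq : (((board.filter pvKing).length : Int) == 1) = true := by simp [h]
    simp only [hbeq, if_true, if_pos h]
    exact pv_find_eq board h'
  · have hbeq : (((board.filter pvKing).length : Int) == 1) = false := by
      simp [h]
    simp [hbeq, h]
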